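-- pv_equiv track=rewrite | github.com/UM-ARM-Lab/data-augmentation-for-manipulation | link_bot_data/src/link_bot_data/dataset_utils.py | replaced_true_with_predicted
-- ===== SOURCE A (Python) =====
-- from typing import Optional, Dict, List, Sequence
--
-- PREDICTED_PREFIX = 'predicted/'
--
-- def remove_predicted(k: str):
--     if k.startswith(PREDICTED_PREFIX):
--         return k[len(PREDICTED_PREFIX):]
--     else:
--         return k
--
-- def replaced_true_with_predicted(d: Dict):
--     keys_to_pop = []
--     out_d = d.copy()
--     for k in out_d.keys():
--         k_predicted_removed = remove_predicted(k)
--         if k.startswith(PREDICTED_PREFIX) and k_predicted_removed in out_d: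
--             keys_to_pop.append(k_predicted_removed)
--     for k in keys_to_pop:
--         out_d.pop(k)
--     return {remove_predicted(k): v for k, v in out_d.items()}
-- ===== SOURCE B (Python) =====
-- PREDICTED_PREFIX = 'predicted/'
--
--
-- def remove_predicted(k: str):
--     if k.startswith(PREDICTED_PREFIX):
--         return k[len(PREDICTED_PREFIX):]
--     else:
--         return k
--
--
-- def replaced_true_with_predicted(d):
--     # Online single pass with eviction: walk the items once; the moment a
--     # 'predicted/' key is seen, evict its true counterpart from the partial
--     # result (whether already emitted or yet to come, via the shadowed set),
--     # then strip prefixes at the end.  No copy of d, no keys_to_pop pass,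
--     # no membership test against d at all.
--     out = {}
--     shadowed = set()
--     for k, v in d.items():
--         if k.startswith(PREDICTED_PREFIX):
--             base = k[len(PREDICTED_PREFIX):]
--             shadowed.add(base)
--             out.pop(base, None)
--         if k not in shadowed:
--             out[k] = v
--     return {remove_predicted(k): v for k, v in out.items()}
-- ===== Notes on version B (the rewrite author's own statement) =====
-- stated objective: alternative
-- what changed: Replaces A's staged copy/collect-keys_to_pop/pop/re-key passes with an online single pass that maintains the surviving entries and a 'shadowed' set of stripped names: when a predicted key arrives its true counterpart is evicted immediately (popped if already emitted, suppressed via the set if yet to come), so B never copies d, never builds keys_to_pop and never tests membership in d.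
import Mathlib
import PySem

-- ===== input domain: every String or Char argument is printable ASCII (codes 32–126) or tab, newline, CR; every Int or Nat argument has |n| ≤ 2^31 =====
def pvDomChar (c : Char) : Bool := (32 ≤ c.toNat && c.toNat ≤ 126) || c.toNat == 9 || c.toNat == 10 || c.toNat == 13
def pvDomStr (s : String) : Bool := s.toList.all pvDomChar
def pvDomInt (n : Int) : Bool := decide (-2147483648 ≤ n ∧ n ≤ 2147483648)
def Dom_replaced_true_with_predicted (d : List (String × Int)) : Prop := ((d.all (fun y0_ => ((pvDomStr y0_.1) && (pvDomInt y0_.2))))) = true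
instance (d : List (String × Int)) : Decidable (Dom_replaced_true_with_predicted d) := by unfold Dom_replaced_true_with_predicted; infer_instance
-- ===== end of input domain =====

-- B replaces A's staged copy / collect-keys_to_pop / pop / re-key passes with one online pass that
-- keeps the surviving entries and a 'shadowed' set, evicting a true key the moment its predicted
-- counterpart is seen (objective: alternative decomposition, same cost).
-- The dict parameter is the association list read through PySem.Dict.ofList (Python's dict(pairs)).

-- ===== PORT A =====
def remove_predicted (k : String) : String :=
  if PySem.Str.startswith k "predicted/" then PySem.Str.slice k (some 10) none else k

def replaced_true_with_predicted (d : List (String × Int)) : List (String × Int) :=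
  let out_d := PySem.Dict.ofList d
  let keys_to_pop :=
    out_d.keys.foldl (fun acc k =>
      if PySem.Str.startswith k "predicted/" && out_d.contains (remove_predicted k)
      then acc ++ [remove_predicted k] else acc) []
  -- out_d.pop(k): every k in keys_to_pop is present, so Python's pop never raises; erase is exact here
  let out_d' := keys_to_pop.foldl (fun dd k => dd.erase k) out_d
  (out_d'.items.foldl (fun r p => r.insert (remove_predicted p.1) p.2) PySem.Dict.empty).items

-- ===== PORT B =====
-- the loop body of Source B's single pass (state = (out, shadowed)); dict.pop(base, None) is erase
def pvBStep (st : PySem.Dict String Int × PySem.Set String) (p : String × Int) :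
    PySem.Dict String Int × PySem.Set String :=
  let st1 :=
    if PySem.Str.startswith p.1 "predicted/" then
      let base := PySem.Str.slice p.1 (some 10) none
      (st.1.erase base, PySem.Set.add st.2 base)
    else st
  if PySem.Set.contains st1.2 p.1 then st1 else (st1.1.insert p.1 p.2, st1.2)

def replaced_true_with_predicted_alt (d : List (String × Int)) : List (String × Int) :=
  let st := (PySem.Dict.ofList d).items.foldl pvBStep (PySem.Dict.empty, PySem.Set.empty)
  (st.1.items.foldl (fun r p => r.insert (remove_predicted p.1) p.2) PySem.Dict.empty).items

-- ===== PRECONDITION & SPEC =====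
def Spec_replaced_true_with_predicted (d : List (String × Int)) (out : List (String × Int)) : Prop := out = replaced_true_with_predicted_alt d
instance (d : List (String × Int)) (out : List (String × Int)) : Decidable (Spec_replaced_true_with_predicted d out) := by unfold Spec_replaced_true_with_predicted; infer_instance

-- ===== CLAIM (what is proved, stated in full; the proofs are below) =====
def Claim_equal_replaced_true_with_predicted : Prop := ∀ (d : List (String × Int)), Dom_replaced_true_with_predicted d → Spec_replaced_true_with_predicted d (replaced_true_with_predicted d)

-- ===== LEMMAS AND PROOFS =====

-- 'predicted/' + x, the (unique) key that shadows x
def pvP (x : String) : String := String.ofList ("predicted/".toList ++ x.toList)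

-- stripping a key that carries the prefix drops its first 10 characters
theorem pv_remove_drop (k : String) (hs : PySem.Str.startswith k "predicted/" = true) :
    (remove_predicted k).toList = k.toList.drop 10 := by
  unfold remove_predicted
  rw [if_pos hs, PySem.Str.toList_slice]
  rw [PySem.Chars.slice_eq_listSlice, PySem.List.slice_from _ (by norm_num)]
  simp

-- 'k starts with the prefix and strips to x' pins k down to pvP x
theorem pv_key_iff (k x : String) :
    (PySem.Str.startswith k "predicted/" = true ∧ remove_predicted k = x) ↔ k = pvP x := by
  constructor
  · rintro ⟨hs, hr⟩
    have hpfx : "predicted/".toList <+: k.toList := by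
      rw [PySem.Str.startswith_eq, PySem.Chars.startswith_iff] at hs
      exact hs
    obtain ⟨t, ht⟩ := hpfx
    have hxl : x.toList = t := by
      rw [← hr, pv_remove_drop k hs, ← ht]
      simp
    apply String.toList_inj.mp
    rw [pvP, String.toList_ofList, ← ht, hxl]
  · rintro rfl
    have hs : PySem.Str.startswith (pvP x) "predicted/" = true := by
      rw [PySem.Str.startswith_eq, PySem.Chars.startswith_iff, pvP]
      simp
    refine ⟨hs, ?_⟩
    apply String.toList_inj.mp
    rw [pv_remove_drop _ hs, pvP, String.toList_ofList]
    simp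

-- === A-side characterisation: the popped dict holds the items whose predicted counterpart is absent ===

-- folding erase over a list of keys filters the items
theorem pv_items_foldl_erase (L : List String) (dd : PySem.Dict String Int) :
    (L.foldl (fun d k => d.erase k) dd).items = dd.items.filter (fun p => !(L.contains p.1)) := by
  induction L generalizing dd with
  | nil => simp
  | cons k L ih =>
      rw [List.foldl_cons, ih]
      have he : (dd.erase k).items = dd.items.filter (fun p => !(p.1 == k)) := by
        simp [PySem.Dict.erase]
      rw [he, List.filter_filter]
      apply List.filter_congr
      intro p _
      simp [beq_eq_decide, Bool.and_comm]

theorem pv_A_filter (d : List (String × Int)) :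
    replaced_true_with_predicted d =
      (((PySem.Dict.ofList d).items.filter
          (fun p => !(decide (pvP p.1 ∈ (PySem.Dict.ofList d).keys)))).foldl
        (fun r p => r.insert (remove_predicted p.1) p.2) PySem.Dict.empty).items := by
  unfold replaced_true_with_predicted
  dsimp only
  set od := PySem.Dict.ofList d with hod
  set ktp := od.keys.foldl (fun acc k =>
      if PySem.Str.startswith k "predicted/" && od.contains (remove_predicted k)
      then acc ++ [remove_predicted k] else acc) [] with hktp
  have hktp' : ktp = ((od.keys.filter (fun k =>
      PySem.Str.startswith k "predicted/" && od.contains (remove_predicted k))).map remove_predicted) := by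
    rw [hktp, PySem.List.foldl_append_if, List.nil_append]
  have hmem : ∀ x : String, x ∈ ktp ↔ (pvP x ∈ od.keys ∧ od.contains x = true) := by
    intro x
    rw [hktp']
    simp only [List.mem_map, List.mem_filter, Bool.and_eq_true]
    constructor
    · rintro ⟨k, ⟨hk, hs, hc⟩, hr⟩
      have hk2 := (pv_key_iff k x).mp ⟨hs, hr⟩
      subst hk2
      refine ⟨hk, ?_⟩
      rwa [hr] at hc
    · rintro ⟨hk, hc⟩
      refine ⟨pvP x, ⟨hk, ?_, ?_⟩, ?_⟩
      · exact ((pv_key_iff _ x).mpr rfl).1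
      · rw [((pv_key_iff _ x).mpr rfl).2]; exact hc
      · exact ((pv_key_iff _ x).mpr rfl).2
  rw [pv_items_foldl_erase]
  have hfil : od.items.filter (fun p => !(ktp.contains p.1))
      = od.items.filter (fun p => !(decide (pvP p.1 ∈ od.keys))) := by
    apply List.filter_congr
    intro p hp
    have hpk : p.1 ∈ od.keys := by
      have hkeq : od.keys = od.items.map (fun q => q.1) := rfl
      rw [hkeq]
      exact List.mem_map_of_mem hp
    have hcp : od.contains p.1 = true := (PySem.Dict.contains_iff_mem_keys od p.1).mpr hpk
    by_cases h : pvP p.1 ∈ od.keys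
    · have : p.1 ∈ ktp := (hmem p.1).mpr ⟨h, hcp⟩
      simp [this, h]
    · have : p.1 ∉ ktp := fun hx => h ((hmem p.1).mp hx).1
      simp [this, h]
  rw [hfil]

-- === B-side invariant: the online pass computes the same filter ===

theorem pv_inv (L : List (String × Int)) (hnd : (L.map Prod.fst).Nodup) :
    (∀ x : String, x ∈ (L.foldl pvBStep (PySem.Dict.empty, PySem.Set.empty)).2 ↔
        pvP x ∈ L.map Prod.fst)
    ∧ (L.foldl pvBStep (PySem.Dict.empty, PySem.Set.empty)).1.items
        = L.filter (fun p => !(decide (pvP p.1 ∈ L.map Prod.fst))) ∧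
      (L.foldl pvBStep (PySem.Dict.empty, PySem.Set.empty)).2.Nodup := by
  induction L using List.reverseRecOn with
  | nil => simp [PySem.Dict.empty, PySem.Set.empty]
  | append_singleton M q ih =>
      have hndM : (M.map Prod.fst).Nodup := by
        rw [List.map_append] at hnd; exact hnd.of_append_left
      have hqM : q.1 ∉ M.map Prod.fst := by
        rw [List.map_append] at hnd
        simp only [List.map_cons, List.map_nil] at hnd
        intro hx
        exact (List.disjoint_of_nodup_append hnd) hx (by simp)
      obtain ⟨ihS, ihD, ihN⟩ := ih hndM
      rw [List.foldl_append, List.foldl_cons, List.foldl_nil]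
      set st := M.foldl pvBStep (PySem.Dict.empty, PySem.Set.empty) with hst
      have houtkeys : ∀ x, x ∈ st.1.keys → x ∈ M.map Prod.fst := by
        intro x hx
        have : st.1.keys = (M.filter (fun p => !(decide (pvP p.1 ∈ M.map Prod.fst)))).map Prod.fst := by
          have : st.1.keys = st.1.items.map (fun p => p.1) := rfl
          rw [this, ihD]
        rw [this] at hx
        obtain ⟨p, hp, hpx⟩ := List.mem_map.mp hx
        exact hpx ▸ List.mem_map_of_mem (List.mem_of_mem_filter hp)
      unfold pvBStep
      by_cases hpre : PySem.Str.startswith q.1 "predicted/" = true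
      · -- q is a predicted key: base gets shadowed and evicted; q itself is kept unless shadowed
        rw [if_pos hpre]
        have hbase : PySem.Str.slice q.1 (some 10) none = remove_predicted q.1 := by
          unfold remove_predicted; rw [if_pos hpre]
        have hq_eq : q.1 = pvP (remove_predicted q.1) := (pv_key_iff q.1 _).mp ⟨hpre, rfl⟩
        dsimp only
        rw [hbase]
        set b := remove_predicted q.1 with hb
        have hPinj : ∀ x : String, pvP x = pvP b → x = b := by
          intro x h
          have h3 := congrArg String.toList h
          simp only [pvP, String.toList_ofList, List.append_cancel_left_eq] at h3
          exact String.toList_inj.mp h3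
        have hS' : ∀ x : String, x ∈ PySem.Set.add st.2 b ↔ pvP x ∈ (M ++ [q]).map Prod.fst := by
          intro x
          rw [PySem.Set.mem_add, ihS]
          simp only [List.map_append, List.map_cons, List.map_nil, List.mem_append,
            List.mem_singleton]
          constructor
          · rintro (h | rfl)
            · exact Or.inl h
            · exact Or.inr hq_eq.symm
          · rintro (h | h)
            · exact Or.inl h
            · exact Or.inr (hPinj x (hq_eq ▸ h))
        -- items of the erased dict: M filtered by the FULL key list
        have hIT : (st.1.erase b).items
            = M.filter (fun p => !(decide (pvP p.1 ∈ (M ++ [q]).map Prod.fst))) := by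
          have he : (st.1.erase b).items = st.1.items.filter (fun p => !(p.1 == b)) := by
            simp [PySem.Dict.erase]
          rw [he, ihD, List.filter_filter]
          apply List.filter_congr
          intro p _
          have hkq : (pvP p.1 ∈ (M ++ [q]).map Prod.fst) ↔
              (pvP p.1 ∈ M.map Prod.fst ∨ p.1 = b) := by
            simp only [List.map_append, List.map_cons, List.map_nil, List.mem_append,
              List.mem_singleton]
            constructor
            · rintro (h | h)
              · exact Or.inl h
              · exact Or.inr (hPinj p.1 (hq_eq ▸ h))
            · rintro (h | h2)
              · exact Or.inl h
              · exact Or.inr (by rw [h2, hq_eq])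
          refine Bool.eq_iff_iff.mpr ?_
          simp only [Bool.and_eq_true, Bool.not_eq_true', decide_eq_false_iff_not,
            beq_eq_false_iff_ne, hkq]
          tauto
        have hkeysE : ∀ x, x ∈ (st.1.erase b).keys → x ∈ M.map Prod.fst := by
          intro x hx
          have hkeq : (st.1.erase b).keys = (st.1.erase b).items.map (fun p => p.1) := rfl
          rw [hkeq, hIT] at hx
          obtain ⟨p, hp, hpx⟩ := List.mem_map.mp hx
          exact hpx ▸ List.mem_map_of_mem (List.mem_of_mem_filter hp)
        by_cases hsh : q.1 ∈ PySem.Set.add st.2 b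
        · rw [if_pos (by rw [PySem.Set.contains_iff]; exact hsh)]
          refine ⟨hS', ?_, PySem.Set.nodup_add _ _ ihN⟩
          rw [hIT, List.filter_append]
          have : [q].filter (fun p => !(decide (pvP p.1 ∈ (M ++ [q]).map Prod.fst))) = [] := by
            simp only [List.filter_cons, List.filter_nil]
            rw [if_neg]
            simp only [Bool.not_eq_true', decide_eq_false_iff_not, not_not]
            exact (hS' q.1).mp hsh
          rw [this, List.append_nil]
        · rw [if_neg (by simp only [PySem.Set.contains_iff]; simpa using hsh)]
          refine ⟨hS', ?_, PySem.Set.nodup_add _ _ ihN⟩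
          dsimp only
          have hfresh : (st.1.erase b).contains q.1 = false := by
            rw [← Bool.not_eq_true]
            intro hc
            exact hqM (hkeysE q.1 ((PySem.Dict.contains_iff_mem_keys _ q.1).mp hc))
          rw [PySem.Dict.items_insert_of_not_contains _ q.2 hfresh, hIT, List.filter_append]
          congr 1
          simp only [List.filter_cons, List.filter_nil]
          rw [if_pos]
          simp only [Bool.not_eq_true', decide_eq_false_iff_not]
          intro h
          exact hsh ((hS' q.1).mpr h)
      · -- q is not predicted: shadowed unchanged, q inserted iff not shadowed
        rw [if_neg hpre]
        have hnoq : ∀ x : String, pvP x ≠ q.1 := by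
          intro x h
          exact hpre (h ▸ ((pv_key_iff (pvP x) x).mpr rfl).1)
        have hS' : ∀ x : String, x ∈ st.2 ↔ pvP x ∈ (M ++ [q]).map Prod.fst := by
          intro x
          rw [ihS]
          simp only [List.map_append, List.mem_append, List.map_cons, List.map_nil,
            List.mem_singleton]
          constructor
          · exact Or.inl
          · rintro (h | h)
            · exact h
            · exact absurd h (hnoq x)
        have hfM : M.filter (fun p => !(decide (pvP p.1 ∈ M.map Prod.fst)))
            = M.filter (fun p => !(decide (pvP p.1 ∈ (M ++ [q]).map Prod.fst))) := by
          apply List.filter_congr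
          intro p _
          have hiff : (pvP p.1 ∈ (M ++ [q]).map Prod.fst) ↔ pvP p.1 ∈ M.map Prod.fst := by
            simp only [List.map_append, List.mem_append, List.map_cons, List.map_nil,
              List.mem_singleton]
            constructor
            · rintro (h | h)
              · exact h
              · exact absurd h (hnoq p.1)
            · exact Or.inl
          refine Bool.eq_iff_iff.mpr ?_
          simp only [Bool.not_eq_true', decide_eq_false_iff_not]
          exact not_congr hiff.symm
        by_cases hsh : q.1 ∈ st.2
        · rw [if_pos (by rw [PySem.Set.contains_iff]; exact hsh)]
          refine ⟨hS', ?_, ihN⟩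
          rw [ihD, List.filter_append, hfM]
          have : [q].filter (fun p => !(decide (pvP p.1 ∈ (M ++ [q]).map Prod.fst))) = [] := by
            simp only [List.filter_cons, List.filter_nil]
            rw [if_neg]
            simp only [Bool.not_eq_true', decide_eq_false_iff_not, not_not]
            exact ((hS' q.1).mp hsh)
          rw [this, List.append_nil]
        · rw [if_neg (by simp only [PySem.Set.contains_iff]; simpa using hsh)]
          refine ⟨hS', ?_, ihN⟩
          dsimp only
          have hfresh : st.1.contains q.1 = false := by
            rw [← Bool.not_eq_true]
            intro hc
            exact hqM (houtkeys q.1 ((PySem.Dict.contains_iff_mem_keys st.1 q.1).mp hc))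
          rw [PySem.Dict.items_insert_of_not_contains _ q.2 hfresh, ihD, List.filter_append, hfM]
          congr 1
          simp only [List.filter_cons, List.filter_nil]
          rw [if_pos]
          simp only [Bool.not_eq_true', decide_eq_false_iff_not]
          intro h
          exact hsh ((hS' q.1).mpr h)

theorem replaced_eq (d : List (String × Int)) :
    replaced_true_with_predicted d = replaced_true_with_predicted_alt d := by
  rw [pv_A_filter]
  unfold replaced_true_with_predicted_alt
  dsimp only
  set od := PySem.Dict.ofList d with hod
  have hnd : (od.items.map Prod.fst).Nodup := PySem.Dict.nodup_keys_ofList d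
  obtain ⟨-, hD, -⟩ := pv_inv od.items hnd
  rw [hD]
  rfl

-- ===== VERDICT (by name: the statement is the Claim_ definition above) =====
theorem replaced_true_with_predicted_spec : Claim_equal_replaced_true_with_predicted := by
  intro d _
  exact (replaced_eq d).symm ▸ rfl
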